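-- pv_equiv track=rewrite | github.com/PrinceOsiria/foobar | Lovely Lucky Lambs/main.py | solution
-- ===== SOURCE A (Python) =====
-- def solution(lambs):
-- 	## Variables
-- 	minimum = 1 # The most junior henchman (with the least seniority) gets exactly 1 LAMB.
--
--
-- 	## Number Validator
-- 	def number_is_valid(number, method, style): # Using the provided rules, each input is checked with it's corresponding style
-- 		if style == "stingy":
-- 			if number>=sum(method[-2:number]) and number<=sum(method[-1:number]*2): # Formula for maximum employees per set of lambs
-- 				return True
-- 		elif style == "generous":
-- 			if (number!=minimum) and number>sum(method[-2:number]) and number==sum(method[-1:number]*2): # Formula for maximum lambs per employee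
-- 				return True
--
--
-- 	## Generous Method
-- 	generous = [minimum] # (There will always be at least 1 henchman on a team.)
-- 	number = minimum
-- 	while sum(generous) + number <= lambs:
-- 		if number_is_valid(number, generous, "generous"):
-- 			generous.append(number)
-- 		number += 1
--
--
-- 	##Stingy Method
-- 	stingy = [minimum] # (There will always be at least 1 henchman on a team.)
-- 	number = minimum
-- 	while sum(stingy) + number <= lambs:
-- 		if number_is_valid(number, stingy, "stingy"):
-- 			stingy.append(number)
-- 		number += 1
--
--
-- 	## Return
-- 	if debug == True:
-- 		return "\nInput: "+str(lambs)+"\n"+"Generous:"+str(generous),"Stingy: "+str(stingy), "Output: "+str(abs(len(generous) - len(stingy))) # Returns the difference between the number of henchmen receiving lambs via the provided methods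
-- 	else:
-- 		return abs(len(stingy) - len(generous))
--
-- debug = True
-- ===== SOURCE B (Python) =====
-- def solution(lambs):
-- 	# Same result as A, computed directly: the generous list is the powers of two
-- 	# and the stingy list is the Fibonacci numbers, each grown while the running
-- 	# sum stays within lambs (O(log lambs) instead of scanning every number).
-- 	generous = [1]
-- 	gs, p = 1, 2
-- 	while gs + p <= lambs:
-- 		generous.append(p)
-- 		gs += p
-- 		p *= 2
-- 	stingy = [1]
-- 	ss, a, b = 1, 0, 1
-- 	while True:
-- 		f = a + b
-- 		if ss + f > lambs:
-- 			break
-- 		stingy.append(f)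
-- 		ss += f
-- 		a, b = b, f
-- 	return "\nInput: "+str(lambs)+"\n"+"Generous:"+str(generous), "Stingy: "+str(stingy), "Output: "+str(abs(len(generous) - len(stingy)))
-- ===== Notes on version B (the rewrite author's own statement) =====
-- stated objective: faster
-- what changed: A scans every integer 1..lambs, re-summing the list and slice windows to decide membership; B grows the power-of-two and Fibonacci lists directly with running sums, doing one step per appended element.
import Mathlib
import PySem

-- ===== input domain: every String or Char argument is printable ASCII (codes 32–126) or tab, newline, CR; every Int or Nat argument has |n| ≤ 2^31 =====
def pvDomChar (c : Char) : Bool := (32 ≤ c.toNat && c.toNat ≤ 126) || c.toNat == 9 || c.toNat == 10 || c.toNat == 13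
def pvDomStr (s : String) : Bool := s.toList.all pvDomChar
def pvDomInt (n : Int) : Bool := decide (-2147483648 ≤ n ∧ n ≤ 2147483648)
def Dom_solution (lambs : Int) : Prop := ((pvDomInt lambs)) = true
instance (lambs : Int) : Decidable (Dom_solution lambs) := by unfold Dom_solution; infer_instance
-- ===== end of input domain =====

-- B replaces A's scan of every candidate number (O(lambs) loop with slice sums) by directly
-- growing the power-of-two and Fibonacci lists while their running sums fit (O(log lambs)).


-- shared by both ports: Python's str(list_of_ints), e.g. "[1, 2, 4]"
def pyListRepr (l : List Int) : String :=
  "[" ++ String.intercalate ", " (l.map PySem.Int.toStr) ++ "]"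

-- ===== PORT A =====
-- number_is_valid (minimum is the enclosing function's constant 1)
def numberIsValid (minimum : Int) (number : Int) (method : List Int) (style : String) : Bool :=
  if style == "stingy" then
    decide ((PySem.List.slice method (some (-2)) (some number)).sum ≤ number) &&
    decide (number ≤ ((PySem.List.slice method (some (-1)) (some number)) ++
                      (PySem.List.slice method (some (-1)) (some number))).sum)
  else if style == "generous" then
    (number != minimum) &&
    decide ((PySem.List.slice method (some (-2)) (some number)).sum < number) &&
    (number == ((PySem.List.slice method (some (-1)) (some number)) ++
                (PySem.List.slice method (some (-1)) (some number))).sum)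
  else false

-- the while loop shared by the Generous and Stingy methods (hn is only for termination)
def solLoop (lambs : Int) (style : String) (method : List Int) (number : Int)
    (hn : 1 ≤ number) : List Int :=
  if h : method.sum + number ≤ lambs then
    if numberIsValid 1 number method style then
      solLoop lambs style (method ++ [number]) (number + 1) (by omega)
    else
      solLoop lambs style method (number + 1) (by omega)
  else method
termination_by (lambs - method.sum - number + 1).toNat
decreasing_by
  · simp only [List.sum_append, List.sum_cons, List.sum_nil]; omega
  · omega

def solution (lambs : Int) : List String :=
  let generous := solLoop lambs "generous" [1] 1 (by omega)
  let stingy := solLoop lambs "stingy" [1] 1 (by omega)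
  ["\nInput: " ++ PySem.Int.toStr lambs ++ "\n" ++ "Generous:" ++ pyListRepr generous,
   "Stingy: " ++ pyListRepr stingy,
   "Output: " ++ PySem.Int.toStr |(generous.length : Int) - (stingy.length : Int)|]

-- ===== PORT B =====
def powLoop (lambs : Int) (generous : List Int) (gs p : Int) (hp : 1 ≤ p) : List Int :=
  if gs + p ≤ lambs then
    powLoop lambs (generous ++ [p]) (gs + p) (2 * p) (by omega)
  else generous
termination_by (lambs - gs).toNat
decreasing_by omega

def fibLoop (lambs : Int) (stingy : List Int) (ss a b : Int)
    (ha : 0 ≤ a) (hb : 1 ≤ b) : List Int :=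
  let f := a + b
  if ss + f ≤ lambs then
    fibLoop lambs (stingy ++ [f]) (ss + f) b f (by omega) (by omega)
  else stingy
termination_by (lambs - ss).toNat
decreasing_by omega

def solution_alt (lambs : Int) : List String :=
  let generous := powLoop lambs [1] 1 2 (by omega)
  let stingy := fibLoop lambs [1] 1 0 1 (by omega) (by omega)
  ["\nInput: " ++ PySem.Int.toStr lambs ++ "\n" ++ "Generous:" ++ pyListRepr generous,
   "Stingy: " ++ pyListRepr stingy,
   "Output: " ++ PySem.Int.toStr |(generous.length : Int) - (stingy.length : Int)|]

-- ===== PRECONDITION & SPEC =====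
def Spec_solution (lambs : Int) (out : List String) : Prop := out = solution_alt lambs
instance (lambs : Int) (out : List String) : Decidable (Spec_solution lambs out) := by unfold Spec_solution; infer_instance

-- ===== CLAIM (what is proved, stated in full; the proofs are below) =====
def Claim_equal_solution : Prop := ∀ (lambs : Int), Dom_solution lambs → Spec_solution lambs (solution lambs)

-- ===== LEMMAS AND PROOFS =====

lemma clamp_ge (n : Nat) (k : Int) (h : (n : Int) ≤ k) : PySem.List.clampIdx n k = n := by
  simp only [PySem.List.clampIdx]; split_ifs <;> omega

lemma slice_last1 (l : List Int) (x : Int) (n : Int) (h : (l.length : Int) + 1 ≤ n) :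
    PySem.List.slice (l ++ [x]) (some (-1)) (some n) = [x] := by
  have hcl : PySem.List.clampIdx (l.length + 1) n = l.length + 1 := clamp_ge _ _ (by push_cast; omega)
  simp [PySem.List.slice, hcl]

lemma slice_last2 (l : List Int) (x y : Int) (n : Int) (h : (l.length : Int) + 2 ≤ n) :
    PySem.List.slice (l ++ [x, y]) (some (-2)) (some n) = [x, y] := by
  have hcl : PySem.List.clampIdx (l.length + 2) n = l.length + 2 := clamp_ge _ _ (by push_cast; omega)
  simp [PySem.List.slice, hcl]

lemma slice_last2_single (x : Int) (n : Int) (h : 1 ≤ n) :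
    PySem.List.slice [x] (some (-2)) (some n) = [x] := by
  have hcl : PySem.List.clampIdx 1 n = 1 := clamp_ge _ _ (by push_cast; omega)
  simp [PySem.List.slice, hcl]

-- A's generous loop, from any reachable state, equals B's power-of-two loop.
lemma gmain (c : Nat) : ∀ (lambs : Int) (l0 : List Int) (y n s2 : Int)
    (hn : 1 ≤ n) (hp : 1 ≤ 2 * y),
    (lambs - (l0 ++ [y]).sum - n + 1).toNat < c →
    (l0 ++ [y]).sum = 2 * y - 1 →
    (l0.length : Int) + 1 ≤ y + 1 →
    (∀ n' : Int, ((l0 ++ [y]).length : Int) ≤ n' →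
        (PySem.List.slice (l0 ++ [y]) (some (-2)) (some n')).sum = s2) →
    (∀ n' : Int, ((l0 ++ [y]).length : Int) ≤ n' →
        PySem.List.slice (l0 ++ [y]) (some (-1)) (some n') = [y]) →
    s2 < 2 * y → y < n → n ≤ 2 * y →
    solLoop lambs "generous" (l0 ++ [y]) n hn = powLoop lambs (l0 ++ [y]) (2 * y - 1) (2 * y) hp := by
  induction c with
  | zero => intro lambs l0 y n s2 hn hp hm; omega
  | succ c ih =>
    intro lambs l0 y n s2 hn hp hm hsum hlen hs2 hs1 hs2lt hny hn2y
    have hlenn : ((l0 ++ [y]).length : Int) ≤ n := by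
      simp only [List.length_append, List.length_cons, List.length_nil]; push_cast; omega
    by_cases hg : (l0 ++ [y]).sum + n ≤ lambs
    · rw [solLoop, dif_pos hg]
      have hval : numberIsValid 1 n (l0 ++ [y]) "generous" =
          ((n != 1) && decide (s2 < n) && (n == y + y)) := by
        simp [numberIsValid, hs2 n hlenn, hs1 n hlenn]
      by_cases hcase : n = 2 * y
      · subst hcase
        have hvt : numberIsValid 1 (2 * y) (l0 ++ [y]) "generous" = true := by
          rw [hval]; simp only [Bool.and_eq_true, bne_iff_ne, decide_eq_true_eq, beq_iff_eq]
          refine ⟨⟨by omega, by omega⟩, by omega⟩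
        rw [if_pos hvt]
        rw [powLoop, if_pos (by omega : 2 * y - 1 + 2 * y ≤ lambs)]
        have e1 : (2:Int) * y - 1 + 2 * y = 2 * (2 * y) - 1 := by ring
        rw [e1]
        have hsum' : ((l0 ++ [y]) ++ [2 * y]).sum = 2 * (2 * y) - 1 := by
          simp only [List.sum_append, List.sum_cons, List.sum_nil, add_zero, hsum]; ring
        exact ih lambs (l0 ++ [y]) (2 * y) (2 * y + 1) (y + 2 * y)
          (by omega) (by omega)
          (by rw [hsum']; omega)
          hsum'
          (by simp only [List.length_append, List.length_cons, List.length_nil]; push_cast; omega)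
          (by intro n' hn'
              have hre : (l0 ++ [y]) ++ [2 * y] = l0 ++ [y, 2 * y] := by simp
              rw [hre, slice_last2 l0 y (2 * y) n'
                (by simp only [List.length_append, List.length_cons, List.length_nil] at hn' ⊢
                    push_cast at hn' ⊢; omega)]
              simp)
          (by intro n' hn'
              exact slice_last1 (l0 ++ [y]) (2 * y) n'
                (by simp only [List.length_append, List.length_cons, List.length_nil] at hn' ⊢
                    push_cast at hn' ⊢; omega))
          (by omega) (by omega) (by omega)
      · have hvf : numberIsValid 1 n (l0 ++ [y]) "generous" = false := by
          rw [hval]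
          simp only [Bool.and_eq_false_iff, beq_eq_false_iff_ne]
          right; omega
        rw [if_neg (by simp [hvf])]
        exact ih lambs l0 y (n + 1) s2 (by omega) hp (by omega) hsum hlen hs2 hs1 hs2lt
          (by omega) (by omega)
    · rw [solLoop, dif_neg hg, powLoop, if_neg (by omega)]

-- A's stingy loop, from any reachable state, equals B's Fibonacci loop.
lemma smain (c : Nat) : ∀ (lambs : Int) (l0 : List Int) (a b n : Int)
    (hn : 1 ≤ n) (ha0 : 0 ≤ a) (hb : 1 ≤ b),
    (lambs - (l0 ++ [b]).sum - n + 1).toNat < c →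
    1 ≤ a → a ≤ b →
    (l0.length : Int) + 1 ≤ b + 1 →
    (∀ n' : Int, ((l0 ++ [b]).length : Int) ≤ n' →
        (PySem.List.slice (l0 ++ [b]) (some (-2)) (some n')).sum = a + b) →
    (∀ n' : Int, ((l0 ++ [b]).length : Int) ≤ n' →
        PySem.List.slice (l0 ++ [b]) (some (-1)) (some n') = [b]) →
    b < n → n ≤ a + b →
    solLoop lambs "stingy" (l0 ++ [b]) n hn = fibLoop lambs (l0 ++ [b]) ((l0 ++ [b]).sum) a b ha0 hb := by
  induction c with
  | zero => intro lambs l0 a b n hn ha0 hb hm; omega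
  | succ c ih =>
    intro lambs l0 a b n hn ha0 hb hm ha hab hlen hs2 hs1 hbn hnab
    have hlenn : ((l0 ++ [b]).length : Int) ≤ n := by
      simp only [List.length_append, List.length_cons, List.length_nil]; push_cast; omega
    by_cases hg : (l0 ++ [b]).sum + n ≤ lambs
    · rw [solLoop, dif_pos hg]
      have hval : numberIsValid 1 n (l0 ++ [b]) "stingy" =
          (decide (a + b ≤ n) && decide (n ≤ b + b)) := by
        simp [numberIsValid, hs2 n hlenn, hs1 n hlenn]
      by_cases hcase : n = a + b
      · subst hcase
        have hvt : numberIsValid 1 (a + b) (l0 ++ [b]) "stingy" = true := by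
          rw [hval]; simp only [Bool.and_eq_true, decide_eq_true_eq]
          exact ⟨by omega, by omega⟩
        rw [if_pos hvt]
        rw [fibLoop]
        rw [if_pos (by omega : (l0 ++ [b]).sum + (a + b) ≤ lambs)]
        have hsum' : ((l0 ++ [b]) ++ [a + b]).sum = (l0 ++ [b]).sum + (a + b) := by
          simp only [List.sum_append, List.sum_cons, List.sum_nil, add_zero, add_assoc]
        have := ih lambs (l0 ++ [b]) b (a + b) (a + b + 1)
          (by omega) (by omega) (by omega)
          (by rw [hsum']; omega)
          (by omega) (by omega)
          (by simp only [List.length_append, List.length_cons, List.length_nil]; push_cast; omega)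
          (by intro n' hn'
              have hre : (l0 ++ [b]) ++ [a + b] = l0 ++ [b, a + b] := by simp
              rw [hre, slice_last2 l0 b (a + b) n'
                (by simp only [List.length_append, List.length_cons, List.length_nil] at hn' ⊢
                    push_cast at hn' ⊢; omega)]
              simp)
          (by intro n' hn'
              exact slice_last1 (l0 ++ [b]) (a + b) n'
                (by simp only [List.length_append, List.length_cons, List.length_nil] at hn' ⊢
                    push_cast at hn' ⊢; omega))
          (by omega) (by omega)
        rw [hsum'] at this
        exact this
      · have hvf : numberIsValid 1 n (l0 ++ [b]) "stingy" = false := by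
          rw [hval]
          simp only [Bool.and_eq_false_iff, decide_eq_false_iff_not]
          left; omega
        rw [if_neg (by simp [hvf])]
        exact ih lambs l0 a b (n + 1) (by omega) ha0 hb (by omega) ha hab hlen hs2 hs1
          (by omega) (by omega)
    · rw [solLoop, dif_neg hg, fibLoop]
      rw [if_neg (by omega)]

lemma gen_eq (lambs : Int) (h1 : (1:Int) ≤ 1) (h2 : (1:Int) ≤ 2) :
    solLoop lambs "generous" [1] 1 h1 = powLoop lambs [1] 1 2 h2 := by
  by_cases hg : (1:Int) + 1 ≤ lambs
  · rw [solLoop, dif_pos (by simpa using hg)]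
    rw [if_neg (by decide)]
    have := gmain ((lambs - 1 - 2 + 1).toNat + 1) lambs [] 1 2 1
      (by omega) (by omega)
      (by simp) (by simp) (by simp)
      (by intro n' hn'; rw [show ([] : List Int) ++ [1] = [1] from rfl,
            slice_last2_single 1 n' (by simpa using hn')]; simp)
      (by intro n' hn'; exact slice_last1 [] 1 n' (by simpa using hn'))
      (by omega) (by omega) (by omega)
    simpa using this
  · rw [solLoop, dif_neg (by simpa using hg), powLoop, if_neg (by omega)]

lemma sting_eq (lambs : Int) (h1 : (1:Int) ≤ 1) (ha : (0:Int) ≤ 0) (hb : (1:Int) ≤ 1) :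
    solLoop lambs "stingy" [1] 1 h1 = fibLoop lambs [1] 1 0 1 ha hb := by
  by_cases hg : (1:Int) + 1 ≤ lambs
  · rw [solLoop, dif_pos (by simpa using hg)]
    rw [if_pos (by decide)]
    rw [fibLoop]
    rw [if_pos (by omega : (1:Int) + (0 + 1) ≤ lambs)]
    have := smain ((lambs - 2 - 2 + 1).toNat + 1) lambs [1] 1 1 2
      (by omega) (by omega) (by omega)
      (by simp) (by omega) (by omega) (by simp)
      (by intro n' hn'
          rw [show ([1] : List Int) ++ [1] = [] ++ [1, 1] from rfl,
            slice_last2 [] 1 1 n' (by simpa using hn')]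
          simp)
      (by intro n' hn'; exact slice_last1 [1] 1 n' (by simpa using hn'))
      (by omega) (by omega)
    simp only [show ([1] : List Int) ++ [1] = [1, 1] from rfl] at this
    simp only [show ([1, 1] : List Int).sum = 2 from rfl] at this
    convert this using 2
  · rw [solLoop, dif_neg (by simpa using hg), fibLoop]
    rw [if_neg (by omega)]

-- ===== VERDICT (by name: the statement is the Claim_ definition above) =====
theorem solution_spec : Claim_equal_solution := by
  intro lambs _
  unfold Spec_solution solution solution_alt
  rw [gen_eq lambs (by omega) (by omega), sting_eq lambs (by omega) (by omega) (by omega)]
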